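-- pv_equiv track=rewrite | github.com/npamit/ex12_utils.py | ex12_utils.py | find_length_n_paths
-- ===== SOURCE A (Python) =====
-- DIRECTIONS = {
--     (-1, -1),
--     (-1, 0),
--     (-1, 1),
--     (0, 1),
--     (1, 1),
--     (1, 0),
--     (1, -1),
--     (0, -1)
-- }
--
-- def in_board(board, i, j):
--     return 0 <= i < len(board) and 0 <= j < len(board[0])
--
-- def find_length_n_paths_core(board, words, i, j, path_so_far, word_so_far, n=None, m=None ):
--     if not in_board(board, i, j) or (i, j) in path_so_far:
--         return
--     word = word_so_far + board[i][j]
--     if len(words) == 0: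
--         return
--     path_so_far.append((i, j))
--     if n and n == len(path_so_far):
--         if word in words:
--             yield path_so_far
--         path_so_far.pop()
--         return
--     elif m and len(path_so_far) == m:
--         if word in words:
--             yield path_so_far
--         path_so_far.pop()
--         return
--     words = [w for w in words if w.startswith(word)]
--     for di, dj in DIRECTIONS:
--         yield from find_length_n_paths_core(board, words, i+di, j+dj, path_so_far, word, n, m)
--     path_so_far.pop()
--
-- def find_length_n_paths(n, board, words):
--     if n == 0:
--         return []
--     res = []
--     for i, row in enumerate(board):
--         for j, _ in enumerate(row):
--             gen = find_length_n_paths_core(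
--                 board, words, i, j, [], '', n)
--             res.extend(path.copy() for path in gen)
--     return res
-- ===== SOURCE B (Python) =====
-- # B: breadth-first layered search. Build once a hash set of all word prefixes and a
-- # set of the words; start with every single-cell path whose cell is a word prefix and
-- # extend the whole frontier one step at a time, n-1 times (stopping early when it is
-- # empty), keeping only prefix-viable paths; finally keep the paths spelling a word.
-- # Direction order matches the (deterministic) iteration order of A's DIRECTIONS set.
-- DIRECTIONS_ORDER = [(0, 1), (-1, -1), (-1, 1), (1, 1), (1, -1), (-1, 0), (1, 0), (0, -1)]
--
--
-- def find_length_n_paths(n, board, words):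
--     if n < 1:
--         return []
--     prefixes = set()
--     for w in words:
--         for k in range(len(w) + 1):
--             prefixes.add(w[:k])
--     word_set = set(words)
--     rows = len(board)
--     cols = len(board[0]) if board else 0
--     frontier = []
--     for i in range(rows):
--         for j in range(cols):
--             w = board[i][j]
--             if w in prefixes:
--                 frontier.append(([(i, j)], w))
--     for _ in range(n - 1):
--         if not frontier:
--             break
--         new_frontier = []
--         for path, word in frontier:
--             i, j = path[-1]
--             for di, dj in DIRECTIONS_ORDER:
--                 ni, nj = i + di, j + dj
--                 if 0 <= ni < rows and 0 <= nj < cols and (ni, nj) not in path: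
--                     word2 = word + board[ni][nj]
--                     if word2 in prefixes:
--                         new_frontier.append((path + [(ni, nj)], word2))
--         frontier = new_frontier
--     return [path for path, word in frontier if word in word_set]
-- ===== Notes on version B (the rewrite author's own statement) =====
-- stated objective: faster
-- what changed: A is a recursive generator that re-filters the whole word list with str.startswith at every DFS node; B precomputes a hash set of all word prefixes plus a set of the words and then runs an iterative breadth-first layered search, extending a frontier of prefix-viable paths n-1 times and filtering the final frontier by word membership.
-- outside the precondition, e.g. on find_length_n_paths(1, [['a', 'b'], ['c']], ['x']): A returns [], B raises IndexError
import Mathlib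
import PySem

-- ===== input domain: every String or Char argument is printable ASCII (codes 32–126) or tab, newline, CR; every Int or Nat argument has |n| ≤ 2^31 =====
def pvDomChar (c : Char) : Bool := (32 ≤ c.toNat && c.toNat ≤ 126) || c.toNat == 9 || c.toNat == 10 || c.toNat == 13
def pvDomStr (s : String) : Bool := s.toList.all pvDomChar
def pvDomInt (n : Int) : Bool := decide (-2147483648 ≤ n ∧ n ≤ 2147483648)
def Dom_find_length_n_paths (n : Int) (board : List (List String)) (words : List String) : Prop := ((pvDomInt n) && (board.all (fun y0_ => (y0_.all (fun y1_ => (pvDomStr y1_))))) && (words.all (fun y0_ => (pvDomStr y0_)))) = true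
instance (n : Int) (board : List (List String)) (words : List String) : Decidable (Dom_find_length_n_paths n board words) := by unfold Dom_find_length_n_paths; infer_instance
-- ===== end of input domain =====

-- B replaces A's recursive DFS generator (which re-filters the word list at every node) by an
-- iterative layered breadth-first search over a frontier of prefix-viable paths, pruned by a
-- prefix set built once; same traversal order per path, so the same return value.
-- Both Pythons leave their arguments unchanged (A's path mutation is internal).
-- Strings are carried as List Char (PySem.Chars) in both ports; exact on the stated domain.

-- ===== PORT A =====
-- DIRECTIONS is a Python set of int pairs; its (deterministic) CPython iteration order is:
def pvDirsA : List (Int × Int) := [(0, 1), (-1, -1), (-1, 1), (1, 1), (1, -1), (-1, 0), (1, 0), (0, -1)]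

-- in_board(board, i, j). Python short-circuits before len(board[0]) when board = [],
-- where pyGetD gives [] and the whole test is False either way — exact.
def pvInBoard (board : List (List String)) (i j : Int) : Bool :=
  decide (0 ≤ i ∧ i < PySem.List.len board) && decide (0 ≤ j ∧ j < PySem.List.len (PySem.List.pyGetD board 0 []))

-- find_length_n_paths_core with m = None (the only way A calls it; the `elif m` branch is dead).
-- `fuel` is a totality guard only: the caller passes n.toNat, which bounds the recursion depth
-- (for n ≥ 1 the recursion stops when the path reaches length n; for n < 0 the generator yields
-- nothing and the port returns [] at once, which is A's value there).
-- board[i][j] is ported with pyGetD (Python raises IndexError on rows shorter than row 0;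
-- those boards are excluded by Pre_). path_so_far's append/pop mutation is ported purely;
-- the generator's yields are returned as the concatenated list, in yield order.
def pvAcore (board : List (List String)) (n : Int) :
    Nat → List (List Char) → Int → Int → List (Int × Int) → List Char → List (List (Int × Int))
  | 0, _, _, _, _, _ => []
  | fuel + 1, words, i, j, path, word =>
    if ¬ pvInBoard board i j = true ∨ (i, j) ∈ path then []
    else
      let word' := word ++ (PySem.List.pyGetD (PySem.List.pyGetD board i []) j "").toList
      if words = [] then []
      else
        let path' := path ++ [(i, j)]
        if n ≠ 0 ∧ n = PySem.List.len path' then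
          if word' ∈ words then [path'] else []
        else
          let words' := words.filter (fun w => PySem.Chars.startswith w word')
          pvDirsA.foldl
            (fun acc d => acc ++ pvAcore board n fuel words' (i + d.1) (j + d.2) path' word') []

def find_length_n_paths (n : Int) (board : List (List String)) (words : List String) :
    List (List (Int × Int)) :=
  if n = 0 then []
  else
    let wordsL := words.map String.toList
    let fuel := n.toNat
    (PySem.List.enumerate board).foldl
      (fun res p =>
        (PySem.List.enumerate p.2).foldl
          (fun acc q => acc ++ pvAcore board n fuel wordsL p.1 q.1 [] []) res) []

-- ===== PORT B =====
def pvDirsB : List (Int × Int) := [(0, 1), (-1, -1), (-1, 1), (1, 1), (1, -1), (-1, 0), (1, 0), (0, -1)]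

-- prefixes = {w[:k] for w in words for k in range(len(w)+1)}; w[:k] with 0 ≤ k ≤ len(w) is take — exact.
def pvPrefixSet (words : List (List Char)) : PySem.Set (List Char) :=
  words.foldl
    (fun s w =>
      (PySem.List.pyRange 0 ((w.length : Int) + 1)).foldl (fun s k => PySem.Set.add s (w.take k.toNat)) s)
    PySem.Set.empty

-- the body of B's inner direction loop: the (0 or 1) new frontier states grown from
-- (path, word) by stepping onto cell (ni, nj)
def pvCand (board : List (List String)) (rows cols : Int) (prefixes : PySem.Set (List Char))
    (path : List (Int × Int)) (word : List Char) (ni nj : Int) :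
    List (List (Int × Int) × List Char) :=
  if (0 ≤ ni ∧ ni < rows ∧ 0 ≤ nj ∧ nj < cols) ∧ (ni, nj) ∉ path then
    let word2 := word ++ (PySem.List.pyGetD (PySem.List.pyGetD board ni []) nj "").toList
    if PySem.Set.contains prefixes word2 then [(path ++ [(ni, nj)], word2)] else []
  else []

-- 'i, j = path[-1]; for di, dj in DIRECTIONS_ORDER: …' — frontier paths are never empty,
-- so the pyGetD default is unreachable
def pvExtendOne (board : List (List String)) (rows cols : Int) (prefixes : PySem.Set (List Char))
    (s : List (Int × Int) × List Char) : List (List (Int × Int) × List Char) :=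
  let ij := PySem.List.pyGetD s.1 (-1) ((0 : Int), (0 : Int))
  pvDirsB.foldl (fun acc d => acc ++ pvCand board rows cols prefixes s.1 s.2 (ij.1 + d.1) (ij.2 + d.2)) []

-- 'new_frontier = []; for path, word in frontier: …'
def pvStepB (board : List (List String)) (rows cols : Int) (prefixes : PySem.Set (List Char))
    (frontier : List (List (Int × Int) × List Char)) : List (List (Int × Int) × List Char) :=
  frontier.foldl (fun nf s => nf ++ pvExtendOne board rows cols prefixes s) []

-- 'for _ in range(n - 1): if not frontier: break; …'
def pvLoopB (board : List (List String)) (rows cols : Int) (prefixes : PySem.Set (List Char)) :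
    Nat → List (List (Int × Int) × List Char) → List (List (Int × Int) × List Char)
  | 0, f => f
  | k + 1, f => if f = [] then f else pvLoopB board rows cols prefixes k (pvStepB board rows cols prefixes f)

def find_length_n_paths_alt (n : Int) (board : List (List String)) (words : List String) :
    List (List (Int × Int)) :=
  if n < 1 then []
  else
    let wordsL := words.map String.toList
    let prefixes := pvPrefixSet wordsL
    let wordSet := PySem.Set.ofList wordsL
    let rows : Int := PySem.List.len board
    let cols : Int := PySem.List.len (PySem.List.pyGetD board 0 [])   -- len(board[0]) if board else 0
    let f0 := (PySem.List.pyRange 0 rows).foldl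
      (fun acc i => (PySem.List.pyRange 0 cols).foldl
        (fun acc j =>
          let w := (PySem.List.pyGetD (PySem.List.pyGetD board i []) j "").toList
          if PySem.Set.contains prefixes w then acc ++ [([(i, j)], w)] else acc) acc) []
    let frontier := pvLoopB board rows cols prefixes (n - 1).toNat f0
    (frontier.filter (fun s => PySem.Set.contains wordSet s.2)).map Prod.fst

-- ===== PRECONDITION & SPEC =====
-- Pre_ excludes (unless n = 0, where neither program touches the board) boards having a row
-- shorter than row 0: there A's board[i][j] can raise IndexError, and even where A happens to
-- return [] (e.g. n = 1 with no matching word) the natural B raises IndexError scanning the grid.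
def Pre_find_length_n_paths (n : Int) (board : List (List String)) (words : List String) : Prop :=
  n = 0 ∨ ∀ row ∈ board, (PySem.List.pyGetD board 0 []).length ≤ row.length
instance (n : Int) (board : List (List String)) (words : List String) :
    Decidable (Pre_find_length_n_paths n board words) := by unfold Pre_find_length_n_paths; infer_instance

def pvWitness_find_length_n_paths : Int × List (List String) × List String :=
  (2, [["a", "b"], ["c", "d"]], ["ab", "ca"])

def Spec_find_length_n_paths (n : Int) (board : List (List String)) (words : List String) (out : List (List (Int × Int))) : Prop := out = find_length_n_paths_alt n board words
instance (n : Int) (board : List (List String)) (words : List String) (out : List (List (Int × Int))) : Decidable (Spec_find_length_n_paths n board words out) := by unfold Spec_find_length_n_paths; infer_instance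

-- ===== CLAIM (what is proved, stated in full; the proofs are below) =====
def Claim_equal_find_length_n_paths : Prop := ∀ (n : Int) (board : List (List String)) (words : List String), Dom_find_length_n_paths n board words → Pre_find_length_n_paths n board words → Spec_find_length_n_paths n board words (find_length_n_paths n board words)

-- ===== LEMMAS AND PROOFS =====

-- Proof-only bridge: a per-state DFS that both the filtered-words DFS of A and the layered
-- search of B are shown equal to. Entry checks first (as pvCand does), then leaf/recurse.
def pvBcore (board : List (List String)) (n rows cols : Int)
    (prefixes wordSet : PySem.Set (List Char)) :
    Nat → Int → Int → List (Int × Int) → List Char → List (List (Int × Int))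
  | 0, _, _, _, _ => []
  | fuel + 1, i, j, path, word =>
    if ¬ (0 ≤ i ∧ i < rows ∧ 0 ≤ j ∧ j < cols) ∨ (i, j) ∈ path then []
    else
      let word2 := word ++ (PySem.List.pyGetD (PySem.List.pyGetD board i []) j "").toList
      if ¬ PySem.Set.contains prefixes word2 = true then []
      else
        let path' := path ++ [(i, j)]
        if n = PySem.List.len path' then
          if PySem.Set.contains wordSet word2 then [path'] else []
        else
          pvDirsB.foldl
            (fun acc d => acc ++ pvBcore board n rows cols prefixes wordSet fuel (i + d.1) (j + d.2) path' word2) []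

-- continuation of pvBcore after its entry checks have been passed (state s already validated)
def pvCont (board : List (List String)) (n rows cols : Int)
    (prefixes wordSet : PySem.Set (List Char)) (fuel : Nat)
    (s : List (Int × Int) × List Char) : List (List (Int × Int)) :=
  if n = PySem.List.len s.1 then
    if PySem.Set.contains wordSet s.2 then [s.1] else []
  else
    let ij := PySem.List.pyGetD s.1 (-1) ((0 : Int), (0 : Int))
    pvDirsB.foldl
      (fun acc d => acc ++ pvBcore board n rows cols prefixes wordSet fuel (ij.1 + d.1) (ij.2 + d.2) s.1 s.2) []

theorem pvAcore_nil (board : List (List String)) (n : Int) (fuel : Nat) (i j : Int)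
    (path : List (Int × Int)) (word : List Char) :
    pvAcore board n fuel [] i j path word = [] := by
  cases fuel with
  | zero => rfl
  | succ fuel => simp [pvAcore]

theorem pvMem_foldl_add {α β : Type} [BEq α] [LawfulBEq α] (f : β → α) (l : List β) (p : α) :
    ∀ s : PySem.Set α, p ∈ l.foldl (fun s x => PySem.Set.add s (f x)) s ↔ p ∈ s ∨ ∃ x ∈ l, p = f x := by
  induction l with
  | nil => intro s; simp
  | cons x xs ih =>
    intro s
    simp only [List.foldl_cons, ih, PySem.Set.mem_add, List.mem_cons]
    constructor
    · rintro (⟨h | h⟩ | ⟨y, hy, rfl⟩)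
      · exact .inl h
      · exact .inr ⟨x, .inl rfl, h⟩
      · exact .inr ⟨y, .inr hy, rfl⟩
    · rintro (h | ⟨y, (rfl | hy), rfl⟩)
      · exact .inl (.inl h)
      · exact .inl (.inr rfl)
      · exact .inr ⟨y, hy, rfl⟩

theorem pvMem_inner (w : List Char) (p : List Char) (s : PySem.Set (List Char)) :
    p ∈ (PySem.List.pyRange 0 ((w.length : Int) + 1)).foldl (fun s k => PySem.Set.add s (w.take k.toNat)) s
      ↔ p ∈ s ∨ p <+: w := by
  rw [pvMem_foldl_add]
  apply or_congr Iff.rfl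
  constructor
  · rintro ⟨k, hk, rfl⟩
    exact List.take_prefix _ _
  · intro h
    refine ⟨(p.length : Int), ?_, ?_⟩
    · rw [PySem.List.mem_pyRange_one]
      have := h.length_le
      omega
    · rw [Int.toNat_natCast]
      exact (List.prefix_iff_eq_take.mp h)

theorem pvMem_prefixSet (ws : List (List Char)) (p : List Char) :
    p ∈ pvPrefixSet ws ↔ ∃ w ∈ ws, p <+: w := by
  have main : ∀ s : PySem.Set (List Char),
      p ∈ ws.foldl (fun s w => (PySem.List.pyRange 0 ((w.length : Int) + 1)).foldl
          (fun s k => PySem.Set.add s (w.take k.toNat)) s) s ↔ p ∈ s ∨ ∃ w ∈ ws, p <+: w := by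
    induction ws with
    | nil => intro s; simp
    | cons w ws ih =>
      intro s
      simp only [List.foldl_cons, ih, pvMem_inner, List.mem_cons]
      constructor
      · rintro (⟨h | h⟩ | ⟨y, hy, h⟩)
        · exact .inl h
        · exact .inr ⟨w, .inl rfl, h⟩
        · exact .inr ⟨y, .inr hy, h⟩
      · rintro (h | ⟨y, (rfl | hy), h⟩)
        · exact .inl (.inl h)
        · exact .inl (.inr h)
        · exact .inr ⟨y, hy, h⟩
  rw [pvPrefixSet, main]
  simp [PySem.Set.empty]

theorem pvFilter_startswith_nil (ws : List (List Char)) (word : List Char) :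
    ws.filter (fun w => PySem.Chars.startswith w word) = [] ↔ ¬ ∃ w ∈ ws, word <+: w := by
  simp [List.filter_eq_nil_iff, PySem.Chars.startswith_iff]

theorem pvFilter_collapse (ws : List (List Char)) (word word' : List Char) (h : word <+: word') :
    (ws.filter (fun w => PySem.Chars.startswith w word)).filter
        (fun w => PySem.Chars.startswith w word')
      = ws.filter (fun w => PySem.Chars.startswith w word') := by
  rw [List.filter_filter]
  apply List.filter_congr
  intro w _
  cases hq : PySem.Chars.startswith w word' with
  | false => simp
  | true =>
    have : word <+: w := h.trans (PySem.Chars.startswith_iff w word' |>.mp hq)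
    simp [(PySem.Chars.startswith_iff w word).mpr this]

theorem pvContains_ofList (ws : List (List Char)) (p : List Char) :
    PySem.Set.contains (PySem.Set.ofList ws) p = true ↔ p ∈ ws := by
  rw [← PySem.Set.mem_ofList ws p]
  simp [PySem.Set.contains]

theorem pvCore_eq (board : List (List String)) (n : Int) (hn : n ≠ 0) (ws : List (List Char)) :
    ∀ (fuel : Nat) (i j : Int) (path : List (Int × Int)) (word : List Char),
      pvAcore board n fuel (ws.filter (fun w => PySem.Chars.startswith w word)) i j path word
        = pvBcore board n (board.length : Int) ((PySem.List.pyGetD board 0 []).length : Int)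
            (pvPrefixSet ws) (PySem.Set.ofList ws) fuel i j path word := by
  intro fuel
  induction fuel with
  | zero => intro i j path word; rfl
  | succ fuel ih =>
    intro i j path word
    have hcond : (¬ pvInBoard board i j = true ∨ (i, j) ∈ path) ↔
        (¬ (0 ≤ i ∧ i < (board.length : Int) ∧ 0 ≤ j ∧ j < ((PySem.List.pyGetD board 0 []).length : Int)) ∨ (i, j) ∈ path) := by
      simp [pvInBoard, PySem.List.len_eq]
    by_cases h0 : (¬ pvInBoard board i j = true ∨ (i, j) ∈ path)
    · rw [pvAcore, if_pos h0, pvBcore]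
      rw [if_pos (hcond.mp h0)]
    · rw [pvAcore, pvBcore, if_neg h0, if_neg (fun hh => h0 (hcond.mpr hh))]
      simp only []
      set cell := (PySem.List.pyGetD (PySem.List.pyGetD board i []) j "").toList with hcell
      set word' := word ++ cell with hword'
      have hpre : word <+: word' := List.prefix_append word cell
      by_cases h1 : ws.filter (fun w => PySem.Chars.startswith w word) = []
      · have h2' : word' ∉ pvPrefixSet ws := by
          intro hc
          obtain ⟨w, hw, hpw⟩ := (pvMem_prefixSet ws word').mp hc
          have hmem : w ∈ ws.filter (fun w => PySem.Chars.startswith w word) :=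
            List.mem_filter.mpr ⟨hw, (PySem.Chars.startswith_iff w word).mpr (hpre.trans hpw)⟩
          rw [h1] at hmem
          exact absurd hmem (List.not_mem_nil)
        simp [h1, h2', PySem.Set.contains]
      · rw [if_neg h1]
        by_cases h3 : n = PySem.List.len (path ++ [(i, j)])
        case pos =>
          have hA3 : n ≠ 0 ∧ n = PySem.List.len (path ++ [(i, j)]) := ⟨hn, h3⟩
          rw [if_pos hA3, if_pos h3]
          by_cases h2 : word' ∈ pvPrefixSet ws
          case pos =>
            have hBc : ¬ ¬ PySem.Set.contains (pvPrefixSet ws) word' = true := by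
              simp [PySem.Set.contains]
              exact h2
            rw [if_neg hBc]
            have hAmem : (word' ∈ ws.filter (fun w => PySem.Chars.startswith w word)) ↔ word' ∈ ws := by
              rw [List.mem_filter]
              simp [(PySem.Chars.startswith_iff word' word).mpr hpre]
            by_cases h4 : word' ∈ ws
            · have hBm : PySem.Set.contains (PySem.Set.ofList ws) word' = true :=
                (pvContains_ofList ws word').mpr h4
              rw [if_pos (hAmem.mpr h4), if_pos hBm]
            · have hAm' : word' ∉ ws.filter (fun w => PySem.Chars.startswith w word) :=
                fun hh => h4 (hAmem.mp hh)
              have hBm' : ¬ PySem.Set.contains (PySem.Set.ofList ws) word' = true :=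
                fun hh => h4 ((pvContains_ofList ws word').mp hh)
              rw [if_neg hAm', if_neg hBm']
          case neg =>
            have hBc : ¬ PySem.Set.contains (pvPrefixSet ws) word' = true := by
              simp [PySem.Set.contains]
              exact h2
            rw [if_pos hBc]
            have h4 : word' ∉ ws.filter (fun w => PySem.Chars.startswith w word) := by
              intro hh
              exact h2 ((pvMem_prefixSet ws word').mpr
                ⟨word', (List.mem_filter.mp hh).1, List.prefix_refl _⟩)
            rw [if_neg h4]
        case neg =>
          have hA3 : ¬ (n ≠ 0 ∧ n = PySem.List.len (path ++ [(i, j)])) := fun hh => h3 hh.2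
          rw [if_neg hA3]
          by_cases h2 : word' ∈ pvPrefixSet ws
          case pos =>
            have hBc : ¬ ¬ PySem.Set.contains (pvPrefixSet ws) word' = true := by
              simp [PySem.Set.contains]
              exact h2
            rw [if_neg hBc, if_neg h3]
            have hdirs : pvDirsA = pvDirsB := rfl
            have hfun : (fun (acc : List (List (Int × Int))) (d : Int × Int) =>
                acc ++ pvAcore board n fuel (ws.filter (fun w => PySem.Chars.startswith w word')) (i + d.1) (j + d.2) (path ++ [(i, j)]) word')
              = (fun acc d => acc ++ pvBcore board n (board.length : Int) ((PySem.List.pyGetD board 0 []).length : Int)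
                  (pvPrefixSet ws) (PySem.Set.ofList ws) fuel (i + d.1) (j + d.2) (path ++ [(i, j)]) word') := by
              funext acc d
              rw [ih]
            simp only [pvFilter_collapse ws word word' hpre, hdirs, hfun]
          case neg =>
            have hBc : ¬ PySem.Set.contains (pvPrefixSet ws) word' = true := by
              simp [PySem.Set.contains]
              exact h2
            rw [if_pos hBc]
            have hfilt : ws.filter (fun w => PySem.Chars.startswith w word') = [] := by
              rw [pvFilter_startswith_nil]
              intro hex
              exact h2 ((pvMem_prefixSet ws word').mpr hex)
            simp only [pvFilter_collapse ws word word' hpre, hfilt]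
            simp [pvDirsA, pvAcore_nil]

theorem pvFilter_nil_prefix (ws : List (List Char)) :
    ws.filter (fun w => PySem.Chars.startswith w ([] : List Char)) = ws :=
  List.filter_eq_self.mpr fun w _ => (PySem.Chars.startswith_iff w []).mpr (List.nil_prefix)

theorem pvBcore_out (board : List (List String)) (n rows cols : Int)
    (P W : PySem.Set (List Char)) (fuel : Nat) (i j : Int) (path : List (Int × Int))
    (word : List Char) (hj : ¬ j < cols) :
    pvBcore board n rows cols P W (fuel + 1) i j path word = [] := by
  rw [pvBcore, if_pos]
  left
  intro hh
  exact hj hh.2.2.2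

-- (l.filter p).map f written as a flatMap, to line B's final comprehension and the init
-- loop up with the flatMap algebra used below
theorem pvFilterMap_eq_flatMap {α β : Type} (p : α → Bool) (f : α → β) (l : List α) :
    (l.filter p).map f = l.flatMap (fun x => if p x = true then [f x] else []) := by
  induction l with
  | nil => rfl
  | cons x xs ih =>
    by_cases h : p x = true <;> simp [List.filter_cons, h, ih]

theorem pvBcore_succ_eq_cand (board : List (List String)) (n rows cols : Int)
    (P W : PySem.Set (List Char)) (fuel : Nat) (i j : Int) (path : List (Int × Int))
    (word : List Char) :
    pvBcore board n rows cols P W (fuel + 1) i j path word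
      = (pvCand board rows cols P path word i j).flatMap (pvCont board n rows cols P W fuel) := by
  rw [pvBcore, pvCand]
  by_cases h0 : (0 ≤ i ∧ i < rows ∧ 0 ≤ j ∧ j < cols) ∧ (i, j) ∉ path
  · rw [if_pos h0, if_neg (by push_neg; simp [h0.1, h0.2])]
    simp only []
    set word2 := word ++ (PySem.List.pyGetD (PySem.List.pyGetD board i []) j "").toList with hw2
    by_cases h1 : PySem.Set.contains P word2 = true
    · rw [if_pos h1, if_neg (by simpa [PySem.Set.contains] using h1)]
      simp only [List.flatMap_cons, List.flatMap_nil, List.append_nil, pvCont]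
      rw [PySem.List.pyGetD_neg_one_append_singleton]
    · rw [if_neg h1, if_pos (by simpa [PySem.Set.contains] using h1)]
      rfl
  · rw [if_neg h0, if_pos (by
      by_cases hv : (0 ≤ i ∧ i < rows ∧ 0 ≤ j ∧ j < cols)
      · exact Or.inr (by by_contra hnp; exact h0 ⟨hv, hnp⟩)
      · exact Or.inl hv)]
    rfl

theorem pvExtendOne_eq (board : List (List String)) (rows cols : Int)
    (P : PySem.Set (List Char)) (s : List (Int × Int) × List Char) :
    pvExtendOne board rows cols P s
      = pvDirsB.flatMap (fun d =>
          pvCand board rows cols P s.1 s.2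
            ((PySem.List.pyGetD s.1 (-1) ((0 : Int), (0 : Int))).1 + d.1)
            ((PySem.List.pyGetD s.1 (-1) ((0 : Int), (0 : Int))).2 + d.2)) := by
  rw [pvExtendOne]
  rw [PySem.List.foldl_append_eq_flatMap]
  simp

theorem pvStepB_eq (board : List (List String)) (rows cols : Int)
    (P : PySem.Set (List Char)) (F : List (List (Int × Int) × List Char)) :
    pvStepB board rows cols P F = F.flatMap (pvExtendOne board rows cols P) := by
  rw [pvStepB, PySem.List.foldl_append_eq_flatMap]
  simp

theorem pvCont_step (board : List (List String)) (n rows cols : Int)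
    (P W : PySem.Set (List Char)) (fuel : Nat) (s : List (Int × Int) × List Char)
    (h : ¬ n = PySem.List.len s.1) :
    pvCont board n rows cols P W (fuel + 1) s
      = (pvExtendOne board rows cols P s).flatMap (pvCont board n rows cols P W fuel) := by
  rw [pvCont, if_neg h, pvExtendOne_eq]
  rw [PySem.List.foldl_append_eq_flatMap]
  rw [List.flatMap_assoc]
  simp only [List.nil_append]
  apply List.flatMap_congr
  intro d _
  rw [pvBcore_succ_eq_cand]

theorem pvCand_len (board : List (List String)) (rows cols : Int) (P : PySem.Set (List Char))
    (path : List (Int × Int)) (word : List Char) (ni nj : Int)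
    (s : List (Int × Int) × List Char) (hs : s ∈ pvCand board rows cols P path word ni nj) :
    s.1.length = path.length + 1 := by
  rw [pvCand] at hs
  split_ifs at hs with h1
  · simp at hs
    rw [hs.2]
    simp
  · exact absurd hs (List.not_mem_nil)

theorem pvMain (board : List (List String)) (n rows cols : Int)
    (P W : PySem.Set (List Char)) :
    ∀ (k : Nat) (F : List (List (Int × Int) × List Char)),
      (∀ s ∈ F, n = PySem.List.len s.1 + (k : Int)) →
      ((pvLoopB board rows cols P k F).filter (fun s => PySem.Set.contains W s.2)).map Prod.fst
        = F.flatMap (pvCont board n rows cols P W k) := by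
  intro k
  induction k with
  | zero =>
    intro F hF
    rw [pvLoopB, pvFilterMap_eq_flatMap]
    apply List.flatMap_congr
    intro s hs
    have hlen : n = PySem.List.len s.1 := by simpa using hF s hs
    rw [pvCont, if_pos hlen]
  | succ k ih =>
    intro F hF
    rw [pvLoopB]
    by_cases hFe : F = []
    · rw [if_pos hFe, hFe]
      simp
    · rw [if_neg hFe]
      rw [ih]
      · rw [pvStepB_eq, List.flatMap_assoc]
        apply List.flatMap_congr
        intro s hs
        rw [pvCont_step]
        have := hF s hs
        intro hh
        omega
      · intro s' hs'
        rw [pvStepB_eq, List.mem_flatMap] at hs'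
        obtain ⟨s, hsF, hs'⟩ := hs'
        rw [pvExtendOne_eq, List.mem_flatMap] at hs'
        obtain ⟨d, _, hcand⟩ := hs'
        have hlen := pvCand_len _ _ _ _ _ _ _ _ _ hcand
        have := hF s hsF
        simp only [PySem.List.len_eq] at this ⊢
        omega

-- A with n < 0 returns no paths (the n == len(path) test never fires; the port's fuel is 0)
theorem pvA_nonpos (n : Int) (board : List (List String)) (words : List String)
    (hn : n ≠ 0) (hneg : n < 0) : find_length_n_paths n board words = [] := by
  rw [find_length_n_paths, if_neg hn]
  have h0 : n.toNat = 0 := by omega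
  simp only [h0]
  have inner : ∀ (row : List String) (iN : Int) (res : List (List (Int × Int))),
      (PySem.List.enumerate row).foldl
        (fun acc q => acc ++ pvAcore board n 0 (words.map String.toList) iN q.1 [] []) res = res := by
    intro row iN res
    rw [PySem.List.foldl_append_eq_flatMap]
    simp [pvAcore]
  have outer : ∀ (bs : List (Int × List String)) (res : List (List (Int × Int))),
      bs.foldl (fun res p => (PySem.List.enumerate p.2).foldl
        (fun acc q => acc ++ pvAcore board n 0 (words.map String.toList) p.1 q.1 [] []) res) res = res := by
    intro bs
    induction bs with
    | nil => intro res; rfl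
    | cons b bs ihb => intro res; rw [List.foldl_cons, inner]; exact ihb res
  exact outer _ []

-- A, for n ≥ 1 under Pre_, as a grid flatMap of pvBcore (the shared bridge)
theorem pvA_grid (n : Int) (board : List (List String)) (words : List String)
    (hn : 1 ≤ n)
    (hrows : ∀ row ∈ board, (PySem.List.pyGetD board 0 []).length ≤ row.length) :
    find_length_n_paths n board words
      = (PySem.List.pyRange 0 (board.length : Int)).flatMap (fun i =>
          (PySem.List.pyRange 0 ((PySem.List.pyGetD board 0 []).length : Int)).flatMap (fun j =>
            pvBcore board n (board.length : Int) ((PySem.List.pyGetD board 0 []).length : Int)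
              (pvPrefixSet (words.map String.toList)) (PySem.Set.ofList (words.map String.toList))
              n.toNat i j [] [])) := by
  have hn0 : n ≠ 0 := by omega
  rw [find_length_n_paths, if_neg hn0]
  simp only [PySem.List.foldl_append_eq_flatMap, List.nil_append]
  set wsL := words.map String.toList with hwsL
  set cols := (PySem.List.pyGetD board 0 []).length with hcols
  rw [PySem.List.enumerate_eq_map_pyRange board [], List.flatMap_map]
  simp only [PySem.List.len_eq]
  apply List.flatMap_congr
  intro i hi
  rw [PySem.List.mem_pyRange_one] at hi
  set row := PySem.List.pyGetD board i [] with hrow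
  have hrowmem : row ∈ board := PySem.List.pyGetD_mem board [] (by
    constructor <;> omega)
  have hlen : cols ≤ row.length := hrows row hrowmem
  rw [PySem.List.enumerate_eq_map_pyRange row "", List.flatMap_map]
  simp only [PySem.List.len_eq]
  have hcore : ∀ (jI : Int), pvAcore board n n.toNat wsL i jI [] []
      = pvBcore board n (board.length : Int) (cols : Int) (pvPrefixSet wsL) (PySem.Set.ofList wsL)
          n.toNat i jI [] [] := by
    intro jI
    have hc := pvCore_eq board n hn0 wsL n.toNat i jI [] []
    rw [pvFilter_nil_prefix wsL] at hc
    exact hc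
  rw [PySem.List.pyRange_one_append 0 (cols : Int) (row.length : Int) (by positivity) (by exact_mod_cast hlen)]
  rw [List.flatMap_append]
  have htail : (PySem.List.pyRange (cols : Int) (row.length : Int)).flatMap
      (fun j => pvAcore board n n.toNat wsL i j [] []) = [] := by
    apply List.flatMap_eq_nil_iff.mpr
    intro j hj
    rw [PySem.List.mem_pyRange_one] at hj
    rw [hcore]
    obtain ⟨f, hf⟩ : ∃ f, n.toNat = f + 1 := ⟨n.toNat - 1, by omega⟩
    rw [hf]
    apply pvBcore_out
    omega
  rw [htail, List.append_nil]
  apply List.flatMap_congr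
  intro j _
  exact hcore j

-- B, for n ≥ 1, as the same grid flatMap of pvBcore
theorem pvB_grid (n : Int) (board : List (List String)) (words : List String) (hn : 1 ≤ n) :
    find_length_n_paths_alt n board words
      = (PySem.List.pyRange 0 (board.length : Int)).flatMap (fun i =>
          (PySem.List.pyRange 0 ((PySem.List.pyGetD board 0 []).length : Int)).flatMap (fun j =>
            pvBcore board n (board.length : Int) ((PySem.List.pyGetD board 0 []).length : Int)
              (pvPrefixSet (words.map String.toList)) (PySem.Set.ofList (words.map String.toList))
              n.toNat i j [] [])) := by
  rw [find_length_n_paths_alt, if_neg (by omega)]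
  simp only [PySem.List.len_eq]
  set wsL := words.map String.toList with hwsL
  set P := pvPrefixSet wsL with hP
  set W := PySem.Set.ofList wsL with hW
  set rows : Int := (board.length : Int) with hrows
  set cols : Int := ((PySem.List.pyGetD board 0 []).length : Int) with hcols
  -- the initial frontier as a grid flatMap of pvCand
  have hinner : ∀ (i : Int) (acc : List (List (Int × Int) × List Char)),
      (PySem.List.pyRange 0 cols).foldl
        (fun acc j =>
          if PySem.Set.contains P ((PySem.List.pyGetD (PySem.List.pyGetD board i []) j "").toList)
          then acc ++ [([(i, j)], (PySem.List.pyGetD (PySem.List.pyGetD board i []) j "").toList)] else acc) acc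
      = acc ++ (PySem.List.pyRange 0 cols).flatMap (fun j =>
          if PySem.Set.contains P ((PySem.List.pyGetD (PySem.List.pyGetD board i []) j "").toList)
          then [([(i, j)], (PySem.List.pyGetD (PySem.List.pyGetD board i []) j "").toList)] else []) := by
    intro i acc
    rw [show (fun (acc : List (List (Int × Int) × List Char)) (j : Int) =>
          if PySem.Set.contains P ((PySem.List.pyGetD (PySem.List.pyGetD board i []) j "").toList)
          then acc ++ [([(i, j)], (PySem.List.pyGetD (PySem.List.pyGetD board i []) j "").toList)] else acc)
        = (fun acc j => acc ++ (if PySem.Set.contains P ((PySem.List.pyGetD (PySem.List.pyGetD board i []) j "").toList)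
          then [([(i, j)], (PySem.List.pyGetD (PySem.List.pyGetD board i []) j "").toList)] else []))
      from funext₂ (fun acc j => by split <;> simp)]
    rw [PySem.List.foldl_append_eq_flatMap]
  have hinit : (PySem.List.pyRange 0 rows).foldl
      (fun acc i => (PySem.List.pyRange 0 cols).foldl
        (fun acc j =>
          if PySem.Set.contains P ((PySem.List.pyGetD (PySem.List.pyGetD board i []) j "").toList)
          then acc ++ [([(i, j)], (PySem.List.pyGetD (PySem.List.pyGetD board i []) j "").toList)] else acc) acc) []
      = (PySem.List.pyRange 0 rows).flatMap (fun i =>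
          (PySem.List.pyRange 0 cols).flatMap (fun j =>
            pvCand board rows cols P [] [] i j)) := by
    rw [show (fun (acc : List (List (Int × Int) × List Char)) (i : Int) =>
          (PySem.List.pyRange 0 cols).foldl
            (fun acc j =>
              if PySem.Set.contains P ((PySem.List.pyGetD (PySem.List.pyGetD board i []) j "").toList)
              then acc ++ [([(i, j)], (PySem.List.pyGetD (PySem.List.pyGetD board i []) j "").toList)] else acc) acc)
        = (fun acc i => acc ++ (PySem.List.pyRange 0 cols).flatMap (fun j =>
            if PySem.Set.contains P ((PySem.List.pyGetD (PySem.List.pyGetD board i []) j "").toList)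
            then [([(i, j)], (PySem.List.pyGetD (PySem.List.pyGetD board i []) j "").toList)] else []))
      from funext₂ (fun acc i => hinner i acc)]
    rw [PySem.List.foldl_append_eq_flatMap, List.nil_append]
    apply List.flatMap_congr
    intro i hi
    apply List.flatMap_congr
    intro j hj
    rw [PySem.List.mem_pyRange_one] at hi hj
    have hcond : ((0 ≤ i ∧ i < rows ∧ 0 ≤ j ∧ j < cols) ∧ (i, j) ∉ ([] : List (Int × Int))) :=
      ⟨⟨hi.1, hi.2, hj.1, hj.2⟩, List.not_mem_nil⟩
    rw [pvCand, if_pos hcond]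
    simp only [List.nil_append]
  rw [hinit]
  -- run the layered loop via pvMain, with k = (n-1).toNat rounds
  have hmain := pvMain board n rows cols P W (n - 1).toNat
    ((PySem.List.pyRange 0 rows).flatMap (fun i =>
      (PySem.List.pyRange 0 cols).flatMap (fun j => pvCand board rows cols P [] [] i j)))
    (by
      intro s hs
      rw [List.mem_flatMap] at hs
      obtain ⟨i, _, hs⟩ := hs
      rw [List.mem_flatMap] at hs
      obtain ⟨j, _, hcand⟩ := hs
      have := pvCand_len _ _ _ _ _ _ _ _ _ hcand
      simp only [PySem.List.len_eq, this, List.length_nil]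
      omega)
  rw [hmain, List.flatMap_assoc]
  apply List.flatMap_congr
  intro i _
  rw [List.flatMap_assoc]
  apply List.flatMap_congr
  intro j _
  have hfe : (n - 1).toNat + 1 = n.toNat := by omega
  rw [← hfe, ← pvBcore_succ_eq_cand]

theorem pvTop (n : Int) (board : List (List String)) (words : List String)
    (hpre : Pre_find_length_n_paths n board words) :
    find_length_n_paths n board words = find_length_n_paths_alt n board words := by
  by_cases hn0 : n = 0
  · simp [find_length_n_paths, find_length_n_paths_alt, hn0]
  · by_cases hneg : n < 0
    · rw [pvA_nonpos n board words hn0 hneg,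
        find_length_n_paths_alt, if_pos (by omega)]
    · have hn1 : 1 ≤ n := by omega
      obtain (h | hrows) := hpre
      · exact absurd h hn0
      rw [pvA_grid n board words hn1 hrows, pvB_grid n board words hn1]

-- ===== VERDICT (by name: the statement is the Claim_ definition above) =====
theorem find_length_n_paths_spec : Claim_equal_find_length_n_paths := by
  intro n board words _hdom hpre
  unfold Spec_find_length_n_paths
  exact pvTop n board words hpre
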